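-- pv_equiv track=rewrite | github.com/graahand/dsa | max_k_sum.py | max_k_sum
-- ===== SOURCE A (Python) =====
-- from collections import defaultdict
--
-- def max_k_sum(numbers, k):
--     merodict = defaultdict(int)
--     pairs = 0
--     # result = []
--
--     for number in numbers:
--         if merodict[k-number] > 0:
--             pairs += 1
--             # if we were required to return actual pairs
--             # result.append((number, k-number))
--             merodict[k-number] -= 1
--         else:
--             merodict[number] += 1
--     return pairs
-- ===== SOURCE B (Python) =====
-- from collections import Counter
--
-- def max_k_sum(numbers, k):
--     counts = Counter(numbers)
--     total = 0
--     for x, cx in counts.items():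
--         c = k - x
--         if x < c:
--             total += min(cx, counts[c])
--         elif x == c:
--             total += cx // 2
--     return total
-- ===== Notes on version B (the rewrite author's own statement) =====
-- stated objective: alternative
-- what changed: Replaces the online greedy complement-matching over a mutable defaultdict with a two-phase Counter: build the frequency table in one pass, then aggregate over distinct keys (min(count[x],count[k-x]) for x<k-x, count[x]//2 for x==k-x).
import Mathlib
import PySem

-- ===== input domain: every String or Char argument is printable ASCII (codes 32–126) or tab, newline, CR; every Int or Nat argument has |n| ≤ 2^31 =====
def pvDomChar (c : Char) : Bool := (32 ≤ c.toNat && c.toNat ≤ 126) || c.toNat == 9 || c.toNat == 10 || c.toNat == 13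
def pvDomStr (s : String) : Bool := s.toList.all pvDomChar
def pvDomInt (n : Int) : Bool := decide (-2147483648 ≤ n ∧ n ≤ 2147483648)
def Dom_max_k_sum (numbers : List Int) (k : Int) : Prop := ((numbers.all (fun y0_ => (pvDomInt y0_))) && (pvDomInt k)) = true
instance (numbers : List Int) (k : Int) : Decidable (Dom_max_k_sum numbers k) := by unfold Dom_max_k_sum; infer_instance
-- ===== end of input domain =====

-- B replaces A's online greedy matching over a mutable defaultdict by a two-phase
-- Counter-then-aggregate-over-distinct-keys computation (alternative decomposition, same cost).

-- ===== PORT A =====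
-- Loop body of A as a named helper (one step of the greedy; state = (merodict, pairs)).
-- defaultdict(int) lookups are modeled by getD _ 0; its implicit insertion of a 0 value
-- on read changes only the dict's key set, never any looked-up value nor `pairs`, which
-- is all A returns; `merodict[x] -= 1` / `+= 1` are insert of the read value ∓ 1.
def pvStepA (k : Int) (s : PySem.Dict Int Int × Int) (number : Int) : PySem.Dict Int Int × Int :=
  if s.1.getD (k - number) 0 > 0 then
    (s.1.insert (k - number) (s.1.getD (k - number) 0 - 1), s.2 + 1)
  else
    (s.1.insert number (s.1.getD number 0 + 1), s.2)

def max_k_sum (numbers : List Int) (k : Int) : Int :=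
  (numbers.foldl (pvStepA k) (PySem.Dict.empty, 0)).2

-- ===== PORT B =====
def max_k_sum_alt (numbers : List Int) (k : Int) : Int :=
  let counts := PySem.Dict.counter numbers
  counts.items.foldl (fun total xc =>
    let x := xc.1
    let cx := xc.2
    let c := k - x
    if x < c then total + min cx (counts.getD c 0)
    else if x = c then total + PySem.Int.floordiv cx 2
    else total) 0

-- ===== PRECONDITION & SPEC =====
def Spec_max_k_sum (numbers : List Int) (k : Int) (out : Int) : Prop := out = max_k_sum_alt numbers k
instance (numbers : List Int) (k : Int) (out : Int) : Decidable (Spec_max_k_sum numbers k out) := by unfold Spec_max_k_sum; infer_instance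

-- ===== CLAIM (what is proved, stated in full; the proofs are below) =====
def Claim_equal_max_k_sum : Prop := ∀ (numbers : List Int) (k : Int), Dom_max_k_sum numbers k → Spec_max_k_sum numbers k (max_k_sum numbers k)

-- ===== LEMMAS AND PROOFS =====

-- count of x in l, as an Int
def pvCnt (l : List Int) (x : Int) : Int := (l.count x : Int)

-- value held by A's dict for key x after processing l (proved below)
def pvRes (k : Int) (l : List Int) (x : Int) : Int :=
  if x = k - x then pvCnt l x % 2 else max (pvCnt l x - pvCnt l (k - x)) 0

-- increment of the answer when one more n is appended to l
def pvInc (k : Int) (l : List Int) (n : Int) : Int :=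
  if 0 < pvRes k l (k - n) then 1 else 0

-- B's per-distinct-key contribution
def pvTerm (k : Int) (l : List Int) (x : Int) : Int :=
  if x < k - x then min (pvCnt l x) (pvCnt l (k - x))
  else if x = k - x then pvCnt l x / 2 else 0

-- the unique key whose contribution changes when n is appended
def pvKey (k n : Int) : Int := if k - n < n then k - n else n

lemma pvCnt_nonneg (l : List Int) (x : Int) : 0 ≤ pvCnt l x := by
  simp [pvCnt]

lemma pvCnt_append (l : List Int) (n x : Int) :
    pvCnt (l ++ [n]) x = pvCnt l x + (if x = n then 1 else 0) := by
  simp [pvCnt, List.count_append, List.count_singleton]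
  split_ifs with h <;> simp <;> omega

lemma pv_getD_insert (d : PySem.Dict Int Int) (a v x : Int) :
    (d.insert a v).getD x 0 = if x = a then v else d.getD x 0 := by
  unfold PySem.Dict.getD
  by_cases h : x = a
  · simp [h, PySem.Dict.get?_insert_self]
  · simp [h, PySem.Dict.get?_insert_of_ne _ _ h]

-- one greedy step, expressed purely on pvRes
lemma pvRes_step (k : Int) (l : List Int) (n x : Int) :
    (if 0 < pvRes k l (k - n) then
      (if x = k - n then pvRes k l (k - n) - 1 else pvRes k l x)
     else
      (if x = n then pvRes k l n + 1 else pvRes k l x))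
    = pvRes k (l ++ [n]) x := by
  have c1 := pvCnt_nonneg l x
  have c2 := pvCnt_nonneg l (k - x)
  have c3 := pvCnt_nonneg l n
  have c4 := pvCnt_nonneg l (k - n)
  by_cases hx1 : x = k - n
  · subst hx1
    simp only [pvRes, pvCnt_append, sub_sub_cancel]
    by_cases hself : k - n = n
    · simp only [hself] at *
      split_ifs <;> omega
    · simp only [sub_sub_cancel] at *
      split_ifs <;> omega
  · by_cases hx2 : x = n
    · subst hx2
      simp only [pvRes, pvCnt_append, sub_sub_cancel] at *
      by_cases hself : x = k - x
      · rw [← hself] at *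
        split_ifs <;> omega
      · have : ¬ (k - x = x) := fun h => hself h.symm
        split_ifs at * <;> omega
    · have hx3 : ¬ (k - x = n) := by intro h; apply hx1; omega
      simp only [pvRes, pvCnt_append, sub_sub_cancel, if_neg hx2, if_neg hx3, add_zero]
      have hnx : ¬ (k - n = k - x) := by intro h; apply hx2; omega
      by_cases hself : k - n = n
      · simp only [hself] at *
        split_ifs <;> omega
      · split_ifs <;> omega

-- A's dict state after processing l holds pvRes
lemma pvA_state (k : Int) (l : List Int) (x : Int) :
    ((l.foldl (pvStepA k) (PySem.Dict.empty, 0)).1).getD x 0 = pvRes k l x := by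
  induction l using List.reverseRecOn generalizing x with
  | nil => simp [pvRes, pvCnt, PySem.Dict.getD, PySem.Dict.empty, PySem.Dict.get?]
  | append_singleton l n ih =>
    rw [List.foldl_append]
    simp only [List.foldl]
    rw [← pvRes_step k l n x, pvStepA]
    by_cases hpos : 0 < pvRes k l (k - n)
    · rw [if_pos (show _ > (0 : Int) by rw [ih]; exact hpos), if_pos hpos, pv_getD_insert]
      simp only [ih]
    · rw [if_neg (show ¬ (_ > (0 : Int)) by rw [ih]; exact hpos), if_neg hpos, pv_getD_insert]
      simp only [ih]

-- answer recurrence for A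
lemma pvA_pairs (k : Int) (l : List Int) (n : Int) :
    (((l ++ [n]).foldl (pvStepA k) (PySem.Dict.empty, 0)).2)
      = ((l.foldl (pvStepA k) (PySem.Dict.empty, 0)).2) + pvInc k l n := by
  rw [List.foldl_append]
  simp only [List.foldl]
  rw [pvStepA, pvInc]
  rw [pvA_state]
  split_ifs with h
  · rfl
  · simp

-- B's port equals the sum of pvTerm over the distinct elements
lemma pvB_closed (numbers : List Int) (k : Int) :
    max_k_sum_alt numbers k = ((PySem.Set.ofList numbers).map (pvTerm k numbers)).sum := by
  show ((PySem.Dict.counter numbers).items.foldl (fun total xc =>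
      if xc.1 < k - xc.1 then total + min xc.2 ((PySem.Dict.counter numbers).getD (k - xc.1) 0)
      else if xc.1 = k - xc.1 then total + PySem.Int.floordiv xc.2 2
      else total) 0) = _
  rw [PySem.Dict.items_counter, List.foldl_map]
  show List.foldl (fun (acc y : Int) =>
      if y < k - y then acc + min ((numbers.count y : Int)) ((PySem.Dict.counter numbers).getD (k - y) 0)
      else if y = k - y then acc + PySem.Int.floordiv ((numbers.count y : Int)) 2
      else acc) 0 (PySem.Set.ofList numbers) = _
  have hfun : (fun (acc y : Int) =>
      if y < k - y then acc + min ((numbers.count y : Int)) ((PySem.Dict.counter numbers).getD (k - y) 0)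
      else if y = k - y then acc + PySem.Int.floordiv ((numbers.count y : Int)) 2
      else acc) = (fun (acc y : Int) => acc + pvTerm k numbers y) := by
    funext acc y
    rw [PySem.Dict.getD_counter, PySem.Int.floordiv_eq_ediv_of_pos (by norm_num : (0:Int) < 2)]
    unfold pvTerm pvCnt
    split_ifs <;> omega
  rw [hfun, PySem.List.foldl_add]
  simp

lemma pvTerm_eq_zero_of_notMem (k : Int) (l : List Int) (x : Int) (h : x ∉ l) :
    pvTerm k l x = 0 := by
  have hc : pvCnt l x = 0 := by simp [pvCnt, List.count_eq_zero.2 h]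
  have := pvCnt_nonneg l (k - x)
  unfold pvTerm
  rw [hc]
  split_ifs <;> omega

lemma pvSum_ofList_eq_finset (k : Int) (l : List Int) :
    ((PySem.Set.ofList l).map (pvTerm k l)).sum = ∑ x ∈ l.toFinset, pvTerm k l x := by
  have hnd := PySem.Set.nodup_ofList l
  have hfs : (PySem.Set.ofList l).toFinset = l.toFinset := by
    apply Finset.ext
    intro a
    simp [List.mem_toFinset, PySem.Set.mem_ofList]
  rw [← hfs, List.sum_toFinset _ hnd]

-- sum over any superset of the support is the same
lemma pvSum_superset (k : Int) (l : List Int) (s : Finset Int) (hs : l.toFinset ⊆ s) :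
    ∑ x ∈ s, pvTerm k l x = ∑ x ∈ l.toFinset, pvTerm k l x := by
  refine (Finset.sum_subset hs ?_).symm
  intro x _ hx
  exact pvTerm_eq_zero_of_notMem k l x (by simpa [List.mem_toFinset] using hx)

-- pointwise change of pvTerm when one n is appended
lemma pvTerm_append (k : Int) (l : List Int) (n x : Int) :
    pvTerm k (l ++ [n]) x = pvTerm k l x + (if x = pvKey k n then pvInc k l n else 0) := by
  unfold pvTerm pvKey pvInc pvRes
  rw [pvCnt_append, pvCnt_append]
  have c1 := pvCnt_nonneg l x
  have c2 := pvCnt_nonneg l (k - x)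
  have c3 := pvCnt_nonneg l n
  have c4 := pvCnt_nonneg l (k - n)
  by_cases hxn : x = n
  · subst hxn
    by_cases hself : x = k - x
    · -- self-pair key
      have hkx : k - x = x := by omega
      simp only [hkx, if_neg (lt_irrefl x)]
      have : ¬ (k - x < x) := by omega
      simp only [hkx] at *
      split_ifs <;> omega
    · by_cases hlt : x < k - x
      · -- key is x itself
        have hk : ¬ (k - x < x) := by omega
        have hkx : ¬ (k - x = x) := by omega
        simp only [if_pos hlt, if_neg hk, if_neg hkx]
        have hkk : k - (k - x) = x := by ring_nf
        simp only [hkk, if_neg (by omega : ¬ (k - x = x))]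
        split_ifs <;> omega
      · -- k - x < x : key is k - x, x's own term is 0 in both
        have hgt : k - x < x := by omega
        simp only [if_neg hlt, if_pos hgt, if_neg (by omega : ¬ (x = k - x))]
        omega
  · by_cases hkxn : k - x = n
    · -- x = k - n, x ≠ n
      have hx : x = k - n := by omega
      have hnn : ¬ ((k : Int) - n = n) := by omega
      by_cases hlt : x < k - x
      · -- x < n : key = x = k - n since k - n < n is false? here x < n means ¬(k-n < n) is false...
        -- x = k - n and x < n, so k - n < n, key = k - n = x
        have hkey : k - n < n := by omega
        simp only [if_pos hkey, hkxn]
        simp only [hx]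
        have hkk : k - (k - n) = n := by ring_nf
        simp only [hkk, if_neg hnn]
        split_ifs <;> omega
      · -- n ≤ x = k - n, x ≠ n so n < x, key = n ≠ x; x's term 0 in both
        have hself : ¬ (x = k - x) := by omega
        have hkey : ¬ (k - n < n) := by omega
        simp only [if_neg hkey, hkxn]
        split_ifs <;> omega
    · -- x ∉ {n, k-n}: nothing changes, and x ≠ key
      have hxkey : x ≠ (if k - n < n then k - n else n) := by
        split_ifs with h
        · intro hc; exact hkxn (by omega)
        · exact hxn
      simp only [if_neg hxn, if_neg hkxn, add_zero, if_neg hxkey]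

-- B's closed form satisfies the same recurrence as A
lemma pvB_rec (k : Int) (l : List Int) (n : Int) :
    ∑ x ∈ (l ++ [n]).toFinset, pvTerm k (l ++ [n]) x
      = (∑ x ∈ l.toFinset, pvTerm k l x) + pvInc k l n := by
  set s : Finset Int := insert (k - n) (insert n l.toFinset) with hs
  have hsub1 : (l ++ [n]).toFinset ⊆ s := by
    intro a ha
    simp only [List.toFinset_append, Finset.mem_union, List.mem_toFinset, List.mem_singleton] at ha
    simp only [hs, Finset.mem_insert, List.mem_toFinset]
    tauto
  have hsub2 : l.toFinset ⊆ s := by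
    intro a ha
    simp only [hs, Finset.mem_insert]
    tauto
  rw [← pvSum_superset k (l ++ [n]) s hsub1, ← pvSum_superset k l s hsub2]
  have hkey : pvKey k n ∈ s := by
    simp only [hs, Finset.mem_insert, pvKey]
    split_ifs <;> tauto
  calc ∑ x ∈ s, pvTerm k (l ++ [n]) x
      = ∑ x ∈ s, (pvTerm k l x + (if x = pvKey k n then pvInc k l n else 0)) := by
        exact Finset.sum_congr rfl (fun x _ => pvTerm_append k l n x)
    _ = (∑ x ∈ s, pvTerm k l x) + ∑ x ∈ s, (if x = pvKey k n then pvInc k l n else 0) := by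
        rw [Finset.sum_add_distrib]
    _ = (∑ x ∈ s, pvTerm k l x) + pvInc k l n := by
        rw [Finset.sum_ite_eq' s (pvKey k n) (fun _ => pvInc k l n), if_pos hkey]

lemma pvMain (k : Int) (l : List Int) : max_k_sum l k = max_k_sum_alt l k := by
  rw [pvB_closed, pvSum_ofList_eq_finset]
  induction l using List.reverseRecOn with
  | nil => simp [max_k_sum]
  | append_singleton l n ih =>
    unfold max_k_sum at *
    rw [pvA_pairs, pvB_rec, ih]

-- ===== VERDICT (by name: the statement is the Claim_ definition above) =====
theorem max_k_sum_spec : Claim_equal_max_k_sum := by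
  intro numbers k _
  unfold Spec_max_k_sum
  exact pvMain k numbers
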